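-- pv_equiv track=rewrite | github.com/claudlos/Kryptos | strategy33_hill3x3.py | mat3_adj
-- ===== SOURCE A (Python) =====
-- def mat3_adj(M):
--     """Adjugate (cofactor transpose) of 3x3 matrix mod 26."""
--     adj = [[0]*3 for _ in range(3)]
--     adj[0][0] = (M[1][1]*M[2][2] - M[1][2]*M[2][1]) % 26
--     adj[0][1] = (-(M[0][1]*M[2][2] - M[0][2]*M[2][1])) % 26
--     adj[0][2] = (M[0][1]*M[1][2] - M[0][2]*M[1][1]) % 26
--     adj[1][0] = (-(M[1][0]*M[2][2] - M[1][2]*M[2][0])) % 26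
--     adj[1][1] = (M[0][0]*M[2][2] - M[0][2]*M[2][0]) % 26
--     adj[1][2] = (-(M[0][0]*M[1][2] - M[0][2]*M[1][0])) % 26
--     adj[2][0] = (M[1][0]*M[2][1] - M[1][1]*M[2][0]) % 26
--     adj[2][1] = (-(M[0][0]*M[2][1] - M[0][1]*M[2][0])) % 26
--     adj[2][2] = (M[0][0]*M[1][1] - M[0][1]*M[1][0]) % 26
--     return adj
-- ===== SOURCE B (Python) =====
-- def mat3_adj(M):
--     """Adjugate (cofactor transpose) of 3x3 matrix mod 26."""
--     def cof(i, j):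
--         rows = [M[r] for r in range(3) if r != i]
--         m = [[row[c] for c in range(3) if c != j] for row in rows]
--         return (-1) ** (i + j) * (m[0][0] * m[1][1] - m[0][1] * m[1][0])
--     return [[cof(i, j) % 26 for i in range(3)] for j in range(3)]
-- ===== Notes on version B (the rewrite author's own statement) =====
-- stated objective: simpler
-- what changed: Replaces the nine hardcoded cofactor expressions with a uniform nested comprehension: each entry is the signed determinant of the 2x2 minor obtained by deleting row i and column j, placed at the transposed position, reduced mod 26.
import Mathlib
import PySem

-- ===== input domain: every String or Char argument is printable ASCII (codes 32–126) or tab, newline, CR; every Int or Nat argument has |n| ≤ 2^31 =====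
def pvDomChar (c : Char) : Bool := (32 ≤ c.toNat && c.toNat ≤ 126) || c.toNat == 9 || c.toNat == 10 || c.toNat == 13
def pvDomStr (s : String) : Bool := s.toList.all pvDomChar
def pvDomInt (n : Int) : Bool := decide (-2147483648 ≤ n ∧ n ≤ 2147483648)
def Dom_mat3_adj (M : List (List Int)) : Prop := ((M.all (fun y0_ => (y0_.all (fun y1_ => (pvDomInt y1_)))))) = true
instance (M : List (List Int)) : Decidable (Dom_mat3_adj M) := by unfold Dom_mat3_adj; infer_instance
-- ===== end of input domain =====

-- B replaces A's nine hardcoded cofactor expressions with a uniform minor/cofactor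
-- comprehension (delete row i and column j, signed 2x2 determinant, transpose, mod 26): simpler.


-- ===== PORT A =====
-- M[i][j] (nonnegative literal indices; inside Pre_ the lookups are in range, so getD is exact)
def pvGetA (M : List (List Int)) (i j : Int) : Int :=
  (PySem.List.pyGet? ((PySem.List.pyGet? M i).getD []) j).getD 0

def mat3_adj (M : List (List Int)) : List (List Int) :=
  -- the nine assignments into adj, row by row
  [ [ PySem.Int.mod (pvGetA M 1 1 * pvGetA M 2 2 - pvGetA M 1 2 * pvGetA M 2 1) 26,
      PySem.Int.mod (-(pvGetA M 0 1 * pvGetA M 2 2 - pvGetA M 0 2 * pvGetA M 2 1)) 26,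
      PySem.Int.mod (pvGetA M 0 1 * pvGetA M 1 2 - pvGetA M 0 2 * pvGetA M 1 1) 26 ],
    [ PySem.Int.mod (-(pvGetA M 1 0 * pvGetA M 2 2 - pvGetA M 1 2 * pvGetA M 2 0)) 26,
      PySem.Int.mod (pvGetA M 0 0 * pvGetA M 2 2 - pvGetA M 0 2 * pvGetA M 2 0) 26,
      PySem.Int.mod (-(pvGetA M 0 0 * pvGetA M 1 2 - pvGetA M 0 2 * pvGetA M 1 0)) 26 ],
    [ PySem.Int.mod (pvGetA M 1 0 * pvGetA M 2 1 - pvGetA M 1 1 * pvGetA M 2 0) 26,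
      PySem.Int.mod (-(pvGetA M 0 0 * pvGetA M 2 1 - pvGetA M 0 1 * pvGetA M 2 0)) 26,
      PySem.Int.mod (pvGetA M 0 0 * pvGetA M 1 1 - pvGetA M 0 1 * pvGetA M 1 0) 26 ] ]

-- ===== PORT B =====
-- cof(i, j): delete row i and column j, take the 2x2 determinant, apply the sign (-1)**(i+j)
def pvCof (M : List (List Int)) (i j : Int) : Int :=
  let rows := ((PySem.List.pyRange 0 3 1).filter (fun r => r ≠ i)).map
                (fun r => (PySem.List.pyGet? M r).getD [])
  let m := rows.map (fun row =>
             ((PySem.List.pyRange 0 3 1).filter (fun c => c ≠ j)).map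
               (fun c => (PySem.List.pyGet? row c).getD 0))
  let g : Int → Int → Int := fun a b => (PySem.List.pyGet? ((PySem.List.pyGet? m a).getD []) b).getD 0
  (-1 : Int) ^ (i + j).toNat * (g 0 0 * g 1 1 - g 0 1 * g 1 0)

def mat3_adj_alt (M : List (List Int)) : List (List Int) :=
  (PySem.List.pyRange 0 3 1).map (fun j =>
    (PySem.List.pyRange 0 3 1).map (fun i => PySem.Int.mod (pvCof M i j) 26))

-- ===== PRECONDITION & SPEC =====
-- Pre_ excludes exactly the inputs where A raises IndexError: fewer than 3 rows, or one of
-- the first three rows shorter than 3.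
def Pre_mat3_adj (M : List (List Int)) : Prop :=
  3 ≤ M.length ∧ ∀ r ∈ M.take 3, 3 ≤ r.length
instance (M : List (List Int)) : Decidable (Pre_mat3_adj M) := by unfold Pre_mat3_adj; infer_instance

def pvWitness_mat3_adj : List (List Int) := [[1, 2, 3], [0, 1, 4], [5, 6, 0]]

def Spec_mat3_adj (M : List (List Int)) (out : List (List Int)) : Prop := out = mat3_adj_alt M
instance (M : List (List Int)) (out : List (List Int)) : Decidable (Spec_mat3_adj M out) := by unfold Spec_mat3_adj; infer_instance

-- ===== CLAIM (what is proved, stated in full; the proofs are below) =====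
def Claim_equal_mat3_adj : Prop := ∀ (M : List (List Int)), Dom_mat3_adj M → Pre_mat3_adj M → Spec_mat3_adj M (mat3_adj M)

-- ===== LEMMAS AND PROOFS =====
theorem pvGet012 {α : Type} (a b c : α) (t : List α) :
    PySem.List.pyGet? (a :: b :: c :: t) 0 = some a ∧
    PySem.List.pyGet? (a :: b :: c :: t) 1 = some b ∧
    PySem.List.pyGet? (a :: b :: c :: t) 2 = some c := by
  refine ⟨?_, ?_, ?_⟩ <;>
    simp [PySem.List.pyGet?, PySem.List.pyIdx?,
      show ((0:Int) ≤ (t.length:Int)+1) from by omega,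
      show ((0:Int) ≤ (t.length:Int)+1+1) from by omega,
      show ((2:Int) ≤ (t.length:Int)+1+1) from by omega]

theorem pvGet01 {α : Type} (a b : α) :
    PySem.List.pyGet? [a, b] 0 = some a ∧ PySem.List.pyGet? [a, b] 1 = some b := by
  constructor <;> simp [PySem.List.pyGet?, PySem.List.pyIdx?]

-- ===== VERDICT (by name: the statement is the Claim_ definition above) =====
theorem mat3_adj_spec : Claim_equal_mat3_adj := by
  intro M _ hPre
  obtain ⟨hM, hr⟩ := hPre
  obtain _ | ⟨r0, _ | ⟨r1, _ | ⟨r2, rest⟩⟩⟩ := M <;> simp at hM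
  have h0 : 3 ≤ r0.length := hr r0 (by simp)
  have h1 : 3 ≤ r1.length := hr r1 (by simp)
  have h2 : 3 ≤ r2.length := hr r2 (by simp)
  obtain _ | ⟨a0, _ | ⟨a1, _ | ⟨a2, t0⟩⟩⟩ := r0 <;> simp at h0
  obtain _ | ⟨b0, _ | ⟨b1, _ | ⟨b2, t1⟩⟩⟩ := r1 <;> simp at h1
  obtain _ | ⟨c0, _ | ⟨c1, _ | ⟨c2, t2⟩⟩⟩ := r2 <;> simp at h2
  show Spec_mat3_adj _ _
  unfold Spec_mat3_adj mat3_adj mat3_adj_alt pvGetA pvCof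
  simp only [show PySem.List.pyRange 0 3 1 = [0, 1, 2] from by decide]
  norm_num [List.filter, (pvGet012 a0 a1 a2 t0).1, (pvGet012 a0 a1 a2 t0).2.1, (pvGet012 a0 a1 a2 t0).2.2,
        (pvGet012 b0 b1 b2 t1).1, (pvGet012 b0 b1 b2 t1).2.1, (pvGet012 b0 b1 b2 t1).2.2,
        (pvGet012 c0 c1 c2 t2).1, (pvGet012 c0 c1 c2 t2).2.1, (pvGet012 c0 c1 c2 t2).2.2,
        (pvGet012 (a0::a1::a2::t0) (b0::b1::b2::t1) (c0::c1::c2::t2) rest).1,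
        (pvGet012 (a0::a1::a2::t0) (b0::b1::b2::t1) (c0::c1::c2::t2) rest).2.1,
        (pvGet012 (a0::a1::a2::t0) (b0::b1::b2::t1) (c0::c1::c2::t2) rest).2.2,
        pvGet01]
  norm_num [show Int.toNat 2 = 2 from rfl, show Int.toNat 3 = 3 from rfl, show Int.toNat 4 = 4 from rfl]
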